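-- pv_equiv track=rewrite | github.com/nalo26/Advent-Of-Code | 2020/day15/day15 - part1.py | process
-- ===== SOURCE A (Python) =====
-- def process(nbList, n):
--     lastSpoke = -1
--     mostRecentSpokeBeforeThen = -1
--     for i, v in enumerate(nbList[::-1]):
--         if v == n:
--             if lastSpoke == -1:
--                 lastSpoke = len(nbList) - i
--                 continue
--             if mostRecentSpokeBeforeThen == -1:
--                 mostRecentSpokeBeforeThen = len(nbList) - i
--                 break
--     else:
--         return 0
--     return lastSpoke - mostRecentSpokeBeforeThen
-- ===== SOURCE B (Python) =====
-- def process(nbList, n):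
--     # Two-phase: collect all occurrence positions, then subtract the last two.
--     idx = [i for i, v in enumerate(nbList) if v == n]
--     if len(idx) < 2:
--         return 0
--     return idx[-1] - idx[-2]
-- ===== Notes on version B (the rewrite author's own statement) =====
-- stated objective: simpler
-- what changed: Replaces A's reverse-order scan with last/second-last accumulators, continue/break and a for-else clause by a two-phase strategy: build the full forward occurrence-index table once, then return the difference of its last two entries (or 0).
import Mathlib
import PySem

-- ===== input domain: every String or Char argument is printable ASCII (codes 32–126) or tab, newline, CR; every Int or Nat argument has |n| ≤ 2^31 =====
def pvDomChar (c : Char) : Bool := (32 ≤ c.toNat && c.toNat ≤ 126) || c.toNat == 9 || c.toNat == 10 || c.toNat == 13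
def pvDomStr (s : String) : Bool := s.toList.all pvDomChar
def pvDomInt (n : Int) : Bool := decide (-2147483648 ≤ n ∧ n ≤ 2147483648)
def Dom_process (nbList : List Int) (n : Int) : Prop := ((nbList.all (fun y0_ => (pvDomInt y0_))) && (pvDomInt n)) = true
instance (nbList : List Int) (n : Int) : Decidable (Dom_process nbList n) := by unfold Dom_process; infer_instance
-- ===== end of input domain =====

-- B replaces A's reverse early-exit scan (two accumulators, continue/break, for-else) by a
-- two-phase decomposition: build the full forward occurrence-index table, subtract its last two.

-- ===== PORT A =====
-- the for/continue/break/else loop over enumerate(nbList[::-1]); returning the value means break+final return,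
-- reaching [] means the for-else 'return 0'
def processLoopA (n len : Int) : List (Int × Int) → Int → Int → Int
  | [], _, _ => 0
  | (i, v) :: rest, lastSpoke, mostRecent =>
    if v = n then
      if lastSpoke = -1 then processLoopA n len rest (len - i) mostRecent
      else if mostRecent = -1 then lastSpoke - (len - i)
      else processLoopA n len rest lastSpoke mostRecent
    else processLoopA n len rest lastSpoke mostRecent

def process (nbList : List Int) (n : Int) : Int :=
  -- nbList[::-1]; slice? with step -1 is never none, getD [] is unreachable
  let rev := (PySem.List.slice? nbList none none (-1)).getD []
  processLoopA n (nbList.length : Int) (PySem.List.enumerate rev 0) (-1) (-1)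

-- ===== PORT B =====
def process_alt (nbList : List Int) (n : Int) : Int :=
  let idx := ((PySem.List.enumerate nbList 0).filter (fun p => p.2 == n)).map (·.1)
  if idx.length < 2 then 0
  else (PySem.List.pyGet? idx (-1)).getD 0 - (PySem.List.pyGet? idx (-2)).getD 0

-- ===== PRECONDITION & SPEC =====
def Spec_process (nbList : List Int) (n : Int) (out : Int) : Prop := out = process_alt nbList n
instance (nbList : List Int) (n : Int) (out : Int) : Decidable (Spec_process nbList n out) := by unfold Spec_process; infer_instance

-- ===== CLAIM (what is proved, stated in full; the proofs are below) =====
def Claim_equal_process : Prop := ∀ (nbList : List Int) (n : Int), Dom_process nbList n → Spec_process nbList n (process nbList n)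

-- ===== LEMMAS AND PROOFS =====

-- occurrence-index list of n in xs, indices starting at s
def occI (n : Int) : List Int → Int → List Int
  | [], _ => []
  | v :: rest, s => if v = n then s :: occI n rest (s + 1) else occI n rest (s + 1)

theorem occI_eq_filter (n : Int) (xs : List Int) (s : Int) :
    ((PySem.List.enumerate xs s).filter (fun p => p.2 == n)).map (·.1) = occI n xs s := by
  induction xs generalizing s with
  | nil => simp [occI, PySem.List.enumerate_nil]
  | cons v rest ih =>
    simp only [PySem.List.enumerate_cons, List.filter_cons, occI]
    by_cases h : v = n <;> simp [h, ih]

theorem occI_shift (n : Int) (xs : List Int) (s t : Int) :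
    occI n xs (s + t) = (occI n xs s).map (· + t) := by
  induction xs generalizing s with
  | nil => simp [occI]
  | cons v rest ih =>
    simp only [occI]
    have : s + t + 1 = (s + 1) + t := by ring
    by_cases h : v = n <;> simp [h, this, ih]

theorem occI_append (n : Int) (xs : List Int) (a s : Int) :
    occI n (xs ++ [a]) s = occI n xs s ++ (if a = n then [s + xs.length] else []) := by
  induction xs generalizing s with
  | nil => by_cases h : a = n <;> simp [occI, h]
  | cons v rest ih =>
    simp only [List.cons_append, occI, ih]
    by_cases h : v = n <;> by_cases h' : a = n <;>
      simp [h, h'] <;> ring_nf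

-- occurrences of the reversed list, rewritten through the forward occurrences
theorem occI_reverse (n : Int) (xs : List Int) :
    occI n xs.reverse 0 =
      ((occI n xs 0).map (fun j => (xs.length : Int) - 1 - j)).reverse := by
  induction xs with
  | nil => simp [occI]
  | cons v rest ih =>
    have hsh : occI n rest 1 = (occI n rest 0).map (· + 1) := by
      simpa using occI_shift n rest 0 1
    by_cases h : v = n
    · simp only [List.reverse_cons, occI_append, occI, if_pos h, ih, zero_add, hsh,
        List.map_cons, List.map_map, List.reverse_cons]
      congr 1
      · congr 1
        exact List.map_congr_left (fun j _ => by
          push_cast [Function.comp_def, List.length_cons]; ring)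
      · push_cast [List.length_reverse, List.length_cons]; ring_nf
    · simp only [List.reverse_cons, occI_append, occI, if_neg h, ih, zero_add, hsh,
        List.map_map, List.append_nil]
      congr 1
      exact List.map_congr_left (fun j _ => by
        push_cast [Function.comp_def, List.length_cons]; ring)

-- phase 2 of A's loop: lastSpoke already set (L ≠ -1), mostRecent still -1
theorem loopA_phase2 (n len : Int) (ys : List Int) (s L : Int) (hL : L ≠ -1) :
    processLoopA n len (PySem.List.enumerate ys s) L (-1) =
      match occI n ys s with
      | i1 :: _ => L - (len - i1)
      | [] => 0 := by
  induction ys generalizing s with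
  | nil => simp [occI, PySem.List.enumerate_nil, processLoopA]
  | cons v rest ih =>
    simp only [PySem.List.enumerate_cons, processLoopA, occI]
    by_cases h : v = n <;> simp [h, hL, ih]

-- A's loop computes the (len - ·) images of the first two occurrence indices
theorem loopA_char (n len : Int) (ys : List Int) (s : Int)
    (hs : 0 ≤ s) (hlen : s + (ys.length : Int) = len) :
    processLoopA n len (PySem.List.enumerate ys s) (-1) (-1) =
      match occI n ys s with
      | i0 :: i1 :: _ => (len - i0) - (len - i1)
      | _ => 0 := by
  induction ys generalizing s with
  | nil => simp [occI, PySem.List.enumerate_nil, processLoopA]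
  | cons v rest ih =>
    have hlen' : (s + 1) + (rest.length : Int) = len := by
      simp only [List.length_cons] at hlen; push_cast at hlen ⊢; linarith
    by_cases h : v = n
    · have hL : len - s ≠ -1 := by
        have : (0:Int) ≤ (rest.length : Int) := by positivity
        omega
      simp only [PySem.List.enumerate_cons, processLoopA, occI, h, if_true]
      rw [loopA_phase2 n len rest (s+1) (len - s) hL]
      cases occI n rest (s + 1) <;> simp
    · simp only [PySem.List.enumerate_cons, processLoopA, occI, if_neg h]
      exact ih (s+1) (by omega) hlen'

theorem process_eq (nbList : List Int) (n : Int) :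
    process nbList n = process_alt nbList n := by
  unfold process process_alt
  rw [PySem.List.slice?_none_none_neg_one]
  simp only [Option.getD_some, occI_eq_filter]
  rw [loopA_char n (nbList.length : Int) nbList.reverse 0 le_rfl (by simp)]
  rw [occI_reverse]
  set L := occI n nbList 0 with hLdef
  set len := (nbList.length : Int)
  -- analyse the reversed forward occurrence list
  rcases hM : L.reverse with _ | ⟨j0, M'⟩
  · have : L = [] := by simpa using congrArg List.reverse hM
    simp [this]
  · rcases hM' : M' with _ | ⟨j1, M''⟩
    · have hL : L = [j0] := by
        have := congrArg List.reverse hM; simpa [hM'] using this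
      simp [hL]
    · -- L = (M''.reverse) ++ [j1, j0]; length ≥ 2
      have hL : L = M''.reverse ++ [j1, j0] := by
        have := congrArg List.reverse hM; simpa [hM'] using this
      have hlen2 : ¬ (L.map (fun j => len - 1 - j)).length < 2 := by simp [hL]
      have hrev : (L.map (fun j => len - 1 - j)).reverse
          = (len - 1 - j0) :: (len - 1 - j1) :: (M''.map (fun j => len - 1 - j)) := by
        simp [hL]
      rw [hrev]
      simp only [List.length_map] at hlen2
      simp only [hlen2, if_false]
      -- compute idx[-1] and idx[-2] on the forward occurrence list L = M''.reverse ++ [j1, j0]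
      have h1 : PySem.List.pyGet? L (-1) = some j0 := by
        rw [PySem.List.pyGet?_neg_one, hL]; simp
      have h2 : PySem.List.pyGet? L (-2) = some j1 := by
        have hlen : 2 ≤ L.length := by simp [hL]
        rw [PySem.List.pyGet?_neg_ofNat _ 2 (by omega) hlen, hL]
        simp
      simp only [h1, h2, Option.getD_some]
      ring

-- ===== VERDICT (by name: the statement is the Claim_ definition above) =====
theorem process_spec : Claim_equal_process := by
  intro nbList n _
  exact process_eq nbList n
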